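-- pv_equiv track=rewrite | github.com/btittelbach/pyhledger | config.py | populateShorthandDictWithHledgerAccounts
-- ===== SOURCE A (Python) =====
-- def populateShorthandDictWithHledgerAccounts(acctlist, shorthanddict):
--     newdict = {}
--     assert(isinstance(acctlist,list))
--     assert(isinstance(shorthanddict,dict))
--     duplicates = []
--     for acct in acctlist:
--         if len(acct) < 5:
--             continue
--         lastaname = acct.split(u":")[-1]
--         if lastaname in newdict:
--             duplicates.append(lastaname)
--         else:
--             newdict[lastaname] = acct
--     for d in set(duplicates):
--         try:
--             del newdict[d]
--         except:
--             pass
--     ## overwrite newdict values with existing shorthands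
--     newdict.update(shorthanddict)
--     return newdict
-- ===== SOURCE B (Python) =====
-- def populateShorthandDictWithHledgerAccounts(acctlist, shorthanddict):
--     assert(isinstance(acctlist, list))
--     assert(isinstance(shorthanddict, dict))
--     # first pass: count how often each last name occurs among the long-enough accounts
--     counts = {}
--     for acct in acctlist:
--         if len(acct) < 5:
--             continue
--         lastname = acct.split(u":")[-1]
--         counts[lastname] = counts.get(lastname, 0) + 1
--     # second pass: keep exactly the last names that occur once
--     newdict = {}
--     for acct in acctlist:
--         if len(acct) < 5:
--             continue
--         lastname = acct.split(u":")[-1]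
--         if counts[lastname] == 1:
--             newdict[lastname] = acct
--     newdict.update(shorthanddict)
--     return newdict
-- ===== Notes on version B (the rewrite author's own statement) =====
-- stated objective: alternative
-- what changed: A inserts every last name, collects duplicate names on the side and deletes them afterwards; B counts last-name frequencies in a first pass and then builds the dict directly from the accounts whose last name occurs exactly once, with no duplicate bookkeeping or post-hoc deletion.
import Mathlib
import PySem

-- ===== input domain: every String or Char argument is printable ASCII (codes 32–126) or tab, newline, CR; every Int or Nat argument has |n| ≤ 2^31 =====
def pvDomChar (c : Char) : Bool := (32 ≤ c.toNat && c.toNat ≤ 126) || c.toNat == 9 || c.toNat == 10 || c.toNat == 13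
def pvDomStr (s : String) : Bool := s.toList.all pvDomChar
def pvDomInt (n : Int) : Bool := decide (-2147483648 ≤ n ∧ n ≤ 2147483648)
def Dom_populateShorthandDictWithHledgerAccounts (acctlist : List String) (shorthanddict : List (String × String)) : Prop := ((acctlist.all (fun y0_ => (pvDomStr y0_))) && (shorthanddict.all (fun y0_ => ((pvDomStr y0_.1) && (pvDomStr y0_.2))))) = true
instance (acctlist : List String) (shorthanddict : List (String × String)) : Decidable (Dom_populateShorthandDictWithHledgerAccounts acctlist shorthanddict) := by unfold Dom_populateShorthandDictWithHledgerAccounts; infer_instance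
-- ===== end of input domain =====

-- B replaces A's insert-then-collect-duplicates-then-delete dict construction by a
-- count-then-filter two-pass construction (no post-hoc deletion); objective: alternative/simpler.

-- ===== PORT A =====
-- acct.split(u":")[-1]: split? is some because the separator ":" is nonempty, and the split
-- result is never the empty list, so both getD defaults are unreachable.
def pvLastname (acct : String) : String :=
  (PySem.List.pyGet? ((PySem.Str.split? acct ":").getD []) (-1)).getD ""

-- the first for-loop of A, carried state (newdict, duplicates)
def pvLoopA : List String → PySem.Dict String String → List String →
    PySem.Dict String String × List String
  | [], newdict, duplicates => (newdict, duplicates)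
  | acct :: rest, newdict, duplicates =>
    if PySem.Str.len acct < 5 then pvLoopA rest newdict duplicates
    else
      let lastaname := pvLastname acct
      if newdict.contains lastaname then pvLoopA rest newdict (duplicates ++ [lastaname])
      else pvLoopA rest (newdict.insert lastaname acct) duplicates

-- the two isinstance asserts always hold under the type convention
def populateShorthandDictWithHledgerAccounts (acctlist : List String) (shorthanddict : List (String × String)) : List (String × String) :=
  let st := pvLoopA acctlist PySem.Dict.empty []
  -- for d in set(duplicates): del newdict[d]  (the try/except pass makes del a no-op on a
  -- missing key, which is exactly Dict.erase)
  let newdict := (PySem.Set.ofList st.2).foldl (fun d k => d.erase k) st.1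
  (newdict.update shorthanddict).items

-- ===== PORT B =====
-- first pass of B: count last names of the long-enough accounts
def pvCountLoopB : List String → PySem.Dict String Int → PySem.Dict String Int
  | [], counts => counts
  | acct :: rest, counts =>
    if PySem.Str.len acct < 5 then pvCountLoopB rest counts
    else
      let lastname := pvLastname acct
      pvCountLoopB rest (counts.insert lastname (counts.getD lastname 0 + 1))

-- second pass of B: keep exactly the last names occurring once
-- (counts[lastname]: the key is always present here, so getD's default is unreachable)
def pvBuildLoopB (counts : PySem.Dict String Int) :
    List String → PySem.Dict String String → PySem.Dict String String
  | [], newdict => newdict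
  | acct :: rest, newdict =>
    if PySem.Str.len acct < 5 then pvBuildLoopB counts rest newdict
    else
      let lastname := pvLastname acct
      if counts.getD lastname 0 == 1 then
        pvBuildLoopB counts rest (newdict.insert lastname acct)
      else pvBuildLoopB counts rest newdict

def populateShorthandDictWithHledgerAccounts_alt (acctlist : List String) (shorthanddict : List (String × String)) : List (String × String) :=
  let counts := pvCountLoopB acctlist PySem.Dict.empty
  let newdict := pvBuildLoopB counts acctlist PySem.Dict.empty
  (newdict.update shorthanddict).items

-- ===== PRECONDITION & SPEC =====
def Spec_populateShorthandDictWithHledgerAccounts (acctlist : List String) (shorthanddict : List (String × String)) (out : List (String × String)) : Prop := out = populateShorthandDictWithHledgerAccounts_alt acctlist shorthanddict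
instance (acctlist : List String) (shorthanddict : List (String × String)) (out : List (String × String)) : Decidable (Spec_populateShorthandDictWithHledgerAccounts acctlist shorthanddict out) := by unfold Spec_populateShorthandDictWithHledgerAccounts; infer_instance

-- ===== CLAIM (what is proved, stated in full; the proofs are below) =====
def Claim_equal_populateShorthandDictWithHledgerAccounts : Prop := ∀ (acctlist : List String) (shorthanddict : List (String × String)), Dom_populateShorthandDictWithHledgerAccounts acctlist shorthanddict → Spec_populateShorthandDictWithHledgerAccounts acctlist shorthanddict (populateShorthandDictWithHledgerAccounts acctlist shorthanddict)

-- ===== LEMMAS AND PROOFS =====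

-- the (lastname, account) pairs of the long-enough accounts, in list order
def pvPairs (l : List String) : List (String × String) :=
  l.filterMap (fun acct =>
    if PySem.Str.len acct < 5 then none else some (pvLastname acct, acct))

-- A's loop, rephrased over the pair list
def pvPairsLoop : List (String × String) → PySem.Dict String String → List String →
    PySem.Dict String String × List String
  | [], d, dups => (d, dups)
  | p :: ps, d, dups =>
    if d.contains p.1 then pvPairsLoop ps d (dups ++ [p.1])
    else pvPairsLoop ps (d.insert p.1 p.2) dups

-- first occurrences of keys not yet seen / keys seen again
def pvFirstOccs : List String → List (String × String) → List (String × String)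
  | _, [] => []
  | seen, p :: ps =>
    if p.1 ∈ seen then pvFirstOccs seen ps else p :: pvFirstOccs (p.1 :: seen) ps

def pvDupsOf : List String → List (String × String) → List String
  | _, [] => []
  | seen, p :: ps =>
    if p.1 ∈ seen then p.1 :: pvDupsOf seen ps else pvDupsOf (p.1 :: seen) ps

theorem pvLoopA_eq (l : List String) : ∀ (d : PySem.Dict String String) (dups : List String),
    pvLoopA l d dups = pvPairsLoop (pvPairs l) d dups := by
  induction l with
  | nil => intro d dups; rfl
  | cons a l ih =>
    intro d dups
    by_cases h : a.length < 5
    · simp [pvLoopA, pvPairs, h, ih, PySem.Str.len]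
    · by_cases hc : d.contains (pvLastname a) <;>
        simp [pvLoopA, pvPairs, h, hc, ih, pvPairsLoop, PySem.Str.len]

theorem pvFirstOccs_congr (ps : List (String × String)) : ∀ (s s' : List String),
    (∀ k, k ∈ s ↔ k ∈ s') →
    pvFirstOccs s ps = pvFirstOccs s' ps ∧ pvDupsOf s ps = pvDupsOf s' ps := by
  induction ps with
  | nil => intro s s' _; exact ⟨rfl, rfl⟩
  | cons p ps ih =>
    intro s s' h
    by_cases hp : p.1 ∈ s
    · have hp' : p.1 ∈ s' := (h p.1).mp hp
      simp [pvFirstOccs, pvDupsOf, hp, hp', ih s s' h]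
    · have hp' : p.1 ∉ s' := fun hx => hp ((h p.1).mpr hx)
      have h2 : ∀ k, k ∈ p.1 :: s ↔ k ∈ p.1 :: s' := by
        intro k; simp [List.mem_cons, h k]
      simp [pvFirstOccs, pvDupsOf, hp, hp', ih _ _ h2]

theorem pvPairsLoop_eq (ps : List (String × String)) :
    ∀ (d : PySem.Dict String String) (dups : List String),
    pvPairsLoop ps d dups =
      (PySem.Dict.mk (d.items ++ pvFirstOccs d.keys ps), dups ++ pvDupsOf d.keys ps) := by
  induction ps with
  | nil => intro d dups; simp [pvPairsLoop, pvFirstOccs, pvDupsOf]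
  | cons p ps ih =>
    intro d dups
    by_cases hm : p.1 ∈ d.keys
    · have hc : d.contains p.1 = true := by
        rw [PySem.Dict.contains_eq_decide_mem_keys]; simpa using hm
      simp [pvPairsLoop, hc, ih, pvFirstOccs, pvDupsOf, hm]
    · have hc : d.contains p.1 = false := by
        rw [PySem.Dict.contains_eq_decide_mem_keys]; simpa using hm
      have hkeys := PySem.Dict.keys_insert_of_not_contains d p.2 hc
      have hitems := PySem.Dict.items_insert_of_not_contains d p.2 hc
      have hmemiff : ∀ k, k ∈ d.keys ++ [p.1] ↔ k ∈ p.1 :: d.keys := by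
        intro k; simp [List.mem_append, List.mem_cons, or_comm]
      obtain ⟨hfo, hdo⟩ := pvFirstOccs_congr ps (d.keys ++ [p.1]) (p.1 :: d.keys) hmemiff
      simp only [pvPairsLoop, hc, Bool.false_eq_true, ite_false, ih, hkeys, hitems,
        hfo, hdo, pvFirstOccs, pvDupsOf, hm, ite_false]
      simp [List.append_assoc]

theorem pvEraseFoldl (ks : List String) : ∀ (d : PySem.Dict String String),
    ks.foldl (fun d k => d.erase k) d =
      PySem.Dict.mk (d.items.filter (fun p => decide (p.1 ∉ ks))) := by
  induction ks with
  | nil => intro d; simp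
  | cons k ks ih =>
    intro d
    rw [List.foldl_cons, ih]
    have : (d.erase k).items = d.items.filter (fun p => !(p.1 == k)) := rfl
    rw [this, List.filter_filter]
    congr 1
    apply List.filter_congr
    intro p _
    by_cases h : p.1 = k <;> simp [h]

theorem mem_pvDupsOf (ps : List (String × String)) : ∀ (seen : List String) (k : String),
    k ∈ pvDupsOf seen ps ↔
      ((k ∈ seen ∧ 1 ≤ (ps.map (·.1)).count k) ∨ 2 ≤ (ps.map (·.1)).count k) := by
  induction ps with
  | nil => intro seen k; simp [pvDupsOf]
  | cons p ps ih =>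
    intro seen k
    by_cases hp : p.1 ∈ seen <;> by_cases hk : p.1 = k
    · subst hk
      simp only [pvDupsOf, if_pos hp, List.mem_cons, ih, List.map_cons, List.count_cons,
        beq_self_eq_true, if_true]
      constructor
      · intro _; exact Or.inl ⟨hp, by omega⟩
      · intro _; exact Or.inl trivial
    · have hb : (p.1 == k) = false := by simp [hk]
      simp only [pvDupsOf, if_pos hp, List.mem_cons, ih, List.map_cons, List.count_cons, hb]
      constructor
      · rintro (h | h)
        · exact absurd h.symm hk
        · exact h
      · exact Or.inr
    · subst hk
      simp only [pvDupsOf, if_neg hp, ih, List.mem_cons, List.map_cons, List.count_cons,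
        beq_self_eq_true, if_true]
      constructor
      · rintro (⟨_, h1⟩ | h2) <;> (right; omega)
      · rintro (⟨hs, _⟩ | h2)
        · exact absurd hs hp
        · exact Or.inl ⟨by simp, by omega⟩
    · have hb : (p.1 == k) = false := by simp [hk]
      simp only [pvDupsOf, if_neg hp, ih, List.mem_cons, List.map_cons, List.count_cons, hb]
      constructor
      · rintro (⟨hs | hs, h1⟩ | h2)
        · exact absurd hs.symm hk
        · exact Or.inl ⟨hs, h1⟩
        · exact Or.inr h2
      · rintro (⟨hs, h1⟩ | h2)
        · exact Or.inl ⟨Or.inr hs, h1⟩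
        · exact Or.inr h2

theorem mem_pvFirstOccs (ps : List (String × String)) :
    ∀ (seen : List String) (p : String × String), p ∈ pvFirstOccs seen ps → p ∈ ps := by
  induction ps with
  | nil => intro seen p h; simp [pvFirstOccs] at h
  | cons q ps ih =>
    intro seen p h
    by_cases hq : q.1 ∈ seen
    · simp [pvFirstOccs, hq] at h
      exact List.mem_cons_of_mem _ (ih _ _ h)
    · simp [pvFirstOccs, hq] at h
      rcases h with h | h
      · simp [h]
      · exact List.mem_cons_of_mem _ (ih _ _ h)

theorem pvFirstOccs_filter (F : List (String × String)) (ps : List (String × String)) :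
    ∀ (seen : List String), ps.Sublist F →
    (pvFirstOccs seen ps).filter (fun p => (F.map (·.1)).count p.1 == 1) =
      ps.filter (fun p => ((F.map (·.1)).count p.1 == 1) && !(decide (p.1 ∈ seen))) := by
  induction ps with
  | nil => intro seen _; simp [pvFirstOccs]
  | cons p ps ih =>
    intro seen hsub
    have hsub' : ps.Sublist F := List.sublist_of_cons_sublist hsub
    by_cases hp : p.1 ∈ seen
    · rw [show pvFirstOccs seen (p :: ps) = pvFirstOccs seen ps from by simp [pvFirstOccs, hp]]
      rw [ih seen hsub']
      simp [hp]
    · rw [show pvFirstOccs seen (p :: ps) = p :: pvFirstOccs (p.1 :: seen) ps from by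
         simp [pvFirstOccs, hp]]
      rw [List.filter_cons, ih (p.1 :: seen) hsub']
      rw [List.filter_cons]
      have hps : ps.filter (fun q => ((F.map (·.1)).count q.1 == 1) && !(decide (q.1 ∈ p.1 :: seen)))
          = ps.filter (fun q => ((F.map (·.1)).count q.1 == 1) && !(decide (q.1 ∈ seen))) := by
        apply List.filter_congr
        intro q hq
        by_cases hcnt : (F.map (·.1)).count q.1 = 1
        · by_cases hqp : q.1 = p.1
          · -- q.1 = p.1 occurs at least twice in p :: ps ⊆ F, contradicting count 1
            exfalso
            have h1 : 1 ≤ (ps.map (·.1)).count q.1 :=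
              List.one_le_count_iff.mpr (List.mem_map.mpr ⟨q, hq, rfl⟩)
            have hb : (p.1 == q.1) = true := by simp [hqp]
            have hcnt2 : 2 ≤ ((p :: ps).map (·.1)).count q.1 := by
              simp only [List.map_cons, List.count_cons, hb, if_true]
              omega
            have hle : ((p :: ps).map (·.1)).count q.1 ≤ (F.map (·.1)).count q.1 :=
              List.Sublist.count_le _ (List.Sublist.map _ hsub)
            omega
          · simp [List.mem_cons, hqp]
        · have hb : ((F.map (·.1)).count q.1 == 1) = false := by simp [hcnt]
          simp [hb]
      rw [hps]
      by_cases hcnt : (F.map (·.1)).count p.1 = 1 <;> simp [hcnt, hp]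

-- the dict A has built just before newdict.update(shorthanddict)
theorem pvA_predict (l : List String) :
    (PySem.Set.ofList (pvLoopA l PySem.Dict.empty []).2).foldl (fun d k => d.erase k)
        (pvLoopA l PySem.Dict.empty []).1 =
      PySem.Dict.mk ((pvPairs l).filter
        (fun p => ((pvPairs l).map (·.1)).count p.1 == 1)) := by
  rw [pvLoopA_eq, pvPairsLoop_eq]
  simp only [PySem.Dict.keys_empty]
  rw [pvEraseFoldl]
  have hempty : (PySem.Dict.empty : PySem.Dict String String).items = [] := rfl
  simp only [hempty, List.nil_append]
  set F := pvPairs l with hF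
  have h1 : (pvFirstOccs [] F).filter (fun p => decide (p.1 ∉ PySem.Set.ofList (pvDupsOf [] F)))
      = (pvFirstOccs [] F).filter (fun p => (F.map (·.1)).count p.1 == 1) := by
    apply List.filter_congr
    intro p hp
    have hmem : p ∈ F := mem_pvFirstOccs F [] p hp
    have hcnt1 : 1 ≤ (F.map (·.1)).count p.1 :=
      List.one_le_count_iff.mpr (List.mem_map.mpr ⟨p, hmem, rfl⟩)
    have hdup : p.1 ∈ pvDupsOf [] F ↔ 2 ≤ (F.map (·.1)).count p.1 := by
      rw [mem_pvDupsOf]; simp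
    by_cases h2 : 2 ≤ (F.map (·.1)).count p.1
    · have hin : p.1 ∈ pvDupsOf [] F := hdup.mpr h2
      have hb : ((F.map (·.1)).count p.1 == 1) = false := by
        simp only [beq_eq_false_iff_ne, ne_eq]; omega
      simp [PySem.Set.mem_ofList, hin, hb]
    · have hnin : p.1 ∉ pvDupsOf [] F := fun hx => h2 (hdup.mp hx)
      have hb : ((F.map (·.1)).count p.1 == 1) = true := by
        simp only [beq_iff_eq]; omega
      simp [PySem.Set.mem_ofList, hnin, hb]
  congr 1
  refine h1.trans ?_
  rw [pvFirstOccs_filter F F [] (List.Sublist.refl F)]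
  apply List.filter_congr
  intro p _
  simp

-- B's counts dict looks up to the occurrence count among the pairs
theorem pvCountLoopB_eq (l : List String) : ∀ (d : PySem.Dict String Int),
    pvCountLoopB l d =
      ((pvPairs l).map (·.1)).foldl (fun d x => d.insert x (d.getD x 0 + 1)) d := by
  induction l with
  | nil => intro d; rfl
  | cons a l ih =>
    intro d
    by_cases h : a.length < 5 <;>
      simp [pvCountLoopB, pvPairs, h, ih, PySem.Str.len]

theorem pvB_counts (l : List String) (k : String) :
    (pvCountLoopB l PySem.Dict.empty).getD k 0 = (((pvPairs l).map (·.1)).count k : Int) := by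
  rw [pvCountLoopB_eq, PySem.Dict.getD_foldl_insert_add_one]
  simp

-- the dict B has built just before newdict.update(shorthanddict)
-- the dict B has built just before newdict.update(shorthanddict)
theorem pvBuildLoopB_eq (counts : PySem.Dict String Int) (l : List String) :
    ∀ (d : PySem.Dict String String),
    pvBuildLoopB counts l d =
      (pvPairs l).foldl (fun d p =>
        if counts.getD p.1 0 == 1 then d.insert p.1 p.2 else d) d := by
  induction l with
  | nil => intro d; rfl
  | cons a l ih =>
    intro d
    by_cases h : a.length < 5
    · simp [pvBuildLoopB, pvPairs, h, ih, PySem.Str.len]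
    · by_cases hc : counts.getD (pvLastname a) 0 = 1 <;>
        simp [pvBuildLoopB, pvPairs, h, hc, ih, PySem.Str.len]

theorem pvB_predict (l : List String) (counts : PySem.Dict String Int)
    (hc : ∀ k, counts.getD k 0 = (((pvPairs l).map (·.1)).count k : Int)) :
    pvBuildLoopB counts l PySem.Dict.empty =
      PySem.Dict.mk ((pvPairs l).filter
        (fun p => ((pvPairs l).map (·.1)).count p.1 == 1)) := by
  set F := pvPairs l with hF
  rw [pvBuildLoopB_eq]
  have hcond : ∀ p : String × String,
      (counts.getD p.1 0 == 1) = ((F.map (·.1)).count p.1 == 1) := by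
    intro p
    rw [hc p.1]
    by_cases h : (F.map (·.1)).count p.1 = 1
    · simp [h]
    · have h' : ((F.map (·.1)).count p.1 : Int) ≠ 1 := by exact_mod_cast h
      simp [h, h']
  have hfun : (fun (d : PySem.Dict String String) (p : String × String) =>
        if counts.getD p.1 0 == 1 then d.insert p.1 p.2 else d)
      = (fun d p => if (F.map (·.1)).count p.1 == 1 then d.insert p.1 p.2 else d) := by
    funext d p
    rw [hcond p]
  rw [hfun]
  have hfold : (F.foldl (fun d p =>
        if (F.map (·.1)).count p.1 == 1 then d.insert p.1 p.2 else d)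
        (PySem.Dict.empty : PySem.Dict String String))
      = ((F.filter (fun p => (F.map (·.1)).count p.1 == 1)).foldl
          (fun d p => d.insert p.1 p.2) PySem.Dict.empty) := by
    rw [List.foldl_filter]
  rw [hfold]
  have hnodup : ((F.filter (fun p => (F.map (·.1)).count p.1 == 1)).map (·.1)).Nodup := by
    rw [List.nodup_iff_count_le_one]
    intro k
    by_cases hm : k ∈ (F.filter (fun p => (F.map (·.1)).count p.1 == 1)).map (·.1)
    · obtain ⟨p, hpmem, hpk⟩ := List.mem_map.mp hm
      have hpk' : p.1 = k := hpk
      subst hpk'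
      have hcnt : (F.map (·.1)).count p.1 = 1 := by
        have := (List.mem_filter.mp hpmem).2
        simpa using this
      have hle : ((F.filter (fun p => (F.map (·.1)).count p.1 == 1)).map (·.1)).count p.1
          ≤ (F.map (·.1)).count p.1 :=
        List.Sublist.count_le _ (List.Sublist.map _ (List.filter_sublist))
      omega
    · rw [List.count_eq_zero_of_not_mem hm]; omega
  apply PySem.Dict.ext
  have hfresh : ((F.filter (fun p => (F.map (·.1)).count p.1 == 1)).foldl
        (fun d p => d.insert p.1 p.2) (PySem.Dict.empty : PySem.Dict String String)).items
      = (PySem.Dict.empty : PySem.Dict String String).items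
        ++ (F.filter (fun p => (F.map (·.1)).count p.1 == 1)).map (fun p => (p.1, p.2)) :=
    PySem.Dict.items_foldl_insert_fresh _ (fun p : String × String => p.1)
      (fun p : String × String => p.2) _ (fun _ _ => rfl) hnodup
  rw [hfresh]
  simp [show (PySem.Dict.empty : PySem.Dict String String).items = [] from rfl]

theorem populateShorthandDictWithHledgerAccounts_spec : Claim_equal_populateShorthandDictWithHledgerAccounts := by
  intro acctlist shorthanddict _
  show (((PySem.Set.ofList (pvLoopA acctlist PySem.Dict.empty []).2).foldl
        (fun d k => d.erase k) (pvLoopA acctlist PySem.Dict.empty []).1).update shorthanddict).items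
      = ((pvBuildLoopB (pvCountLoopB acctlist PySem.Dict.empty) acctlist
          PySem.Dict.empty).update shorthanddict).items
  rw [pvA_predict, pvB_predict acctlist _ (fun k => pvB_counts acctlist k)]
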